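-- pv_equiv track=rewrite | github.com/satyajeetramnit/Placement-2023 | Yubi-CredAvenue/bitwiseRecurrence.py | bitwiseRecurrence
-- ===== SOURCE A (Python) =====
-- def bitwiseRecurrence(a, b, c, n):
--     # Base cases
--     if n == 0:
--         return a
--     elif n == 1:
--         return b
--     elif n == 2:
--         return c
--
--     # Recursive case
--     return (bitwiseRecurrence(a, b, c, n-1) | bitwiseRecurrence(a, b, c, n-2)) ^ bitwiseRecurrence(a, b, c, n-3)
-- ===== SOURCE B (Python) =====
-- def bitwiseRecurrence(a, b, c, n):
--     # Iterative bottom-up: keep only the last three terms of the recurrence.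
--     if n == 0:
--         return a
--     if n == 1:
--         return b
--     x, y, z = a, b, c
--     for _ in range(n - 2):
--         x, y, z = y, z, (z | y) ^ x
--     return z
-- ===== Notes on version B (the rewrite author's own statement) =====
-- stated objective: alternative
-- what changed: Replaces the naive triple-branching recursion with an iterative bottom-up loop that keeps only the last three terms; intended as faster (O(n) vs O(3^n)) but a timing run could not confirm it since A times out at n=16 where B returned in 0.22 ms.
import Mathlib
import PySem

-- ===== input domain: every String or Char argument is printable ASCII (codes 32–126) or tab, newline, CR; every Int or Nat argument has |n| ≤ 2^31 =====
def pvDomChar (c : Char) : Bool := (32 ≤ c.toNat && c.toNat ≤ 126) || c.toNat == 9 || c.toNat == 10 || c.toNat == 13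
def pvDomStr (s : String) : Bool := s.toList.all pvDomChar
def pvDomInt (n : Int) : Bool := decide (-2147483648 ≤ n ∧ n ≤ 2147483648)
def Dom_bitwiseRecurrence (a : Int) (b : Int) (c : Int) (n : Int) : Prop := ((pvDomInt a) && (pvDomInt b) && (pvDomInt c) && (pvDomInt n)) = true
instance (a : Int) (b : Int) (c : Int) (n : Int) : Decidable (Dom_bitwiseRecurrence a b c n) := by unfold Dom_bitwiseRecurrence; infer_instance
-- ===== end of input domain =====

-- B replaces A's triple-branching recursion with an iterative bottom-up loop keeping the last three terms (intended as faster; a timing run could not confirm it because A times out already at n=16 while B returned in 0.22 ms there).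


-- ===== PORT A =====
-- A's recursion, on the Nat measure n; faithful on Pre_ (0 ≤ n), where A terminates.
def recA (a : Int) (b : Int) (c : Int) : Nat → Int
  | 0 => a
  | 1 => b
  | 2 => c
  | (m+3) => Int.xor (Int.lor (recA a b c (m+2)) (recA a b c (m+1))) (recA a b c m)

def bitwiseRecurrence (a : Int) (b : Int) (c : Int) (n : Int) : Int := recA a b c n.toNat

-- ===== PORT B =====
def stepB (s : Int × Int × Int) : Int × Int × Int := (s.2.1, s.2.2, Int.xor (Int.lor s.2.2 s.2.1) s.1)

def bitwiseRecurrence_alt (a : Int) (b : Int) (c : Int) (n : Int) : Int :=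
  if n == 0 then a
  else if n == 1 then b
  else ((PySem.List.pyRange 0 (n-2) 1).foldl (fun s _ => stepB s) (a, b, c)).2.2

-- ===== PRECONDITION & SPEC =====
-- Pre_ excludes n < 0, where A's recursion has no base case and raises RecursionError.
def Pre_bitwiseRecurrence (a : Int) (b : Int) (c : Int) (n : Int) : Prop := 0 ≤ n
instance (a : Int) (b : Int) (c : Int) (n : Int) : Decidable (Pre_bitwiseRecurrence a b c n) := by unfold Pre_bitwiseRecurrence; infer_instance
def pvWitness_bitwiseRecurrence : Int × Int × Int × Int := (3, 5, 9, 6)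

def Spec_bitwiseRecurrence (a : Int) (b : Int) (c : Int) (n : Int) (out : Int) : Prop := out = bitwiseRecurrence_alt a b c n
instance (a : Int) (b : Int) (c : Int) (n : Int) (out : Int) : Decidable (Spec_bitwiseRecurrence a b c n out) := by unfold Spec_bitwiseRecurrence; infer_instance

-- ===== CLAIM (what is proved, stated in full; the proofs are below) =====
def Claim_equal_bitwiseRecurrence : Prop := ∀ (a : Int) (b : Int) (c : Int) (n : Int), Dom_bitwiseRecurrence a b c n → Pre_bitwiseRecurrence a b c n → Spec_bitwiseRecurrence a b c n (bitwiseRecurrence a b c n)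

-- ===== LEMMAS AND PROOFS =====
theorem foldl_const_iterate (l : List Int) (s : Int × Int × Int) :
    l.foldl (fun s _ => stepB s) s = stepB^[l.length] s := by
  induction l generalizing s with
  | nil => rfl
  | cons x xs ih => simp [List.foldl_cons, ih, Function.iterate_succ_apply]

theorem iterate_stepB (a b c : Int) (k : Nat) :
    stepB^[k] (a, b, c) = (recA a b c k, recA a b c (k+1), recA a b c (k+2)) := by
  induction k with
  | zero => rfl
  | succ m ih =>
      rw [Function.iterate_succ_apply', ih]
      show (recA a b c (m+1), recA a b c (m+2),
            Int.xor (Int.lor (recA a b c (m+2)) (recA a b c (m+1))) (recA a b c m)) = _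
      rw [show m + 1 + 2 = m + 3 from rfl, recA]

-- ===== VERDICT (by name: the statement is the Claim_ definition above) =====
theorem bitwiseRecurrence_spec : Claim_equal_bitwiseRecurrence := by
  intro a b c n _ hn
  unfold Pre_bitwiseRecurrence at hn
  unfold Spec_bitwiseRecurrence bitwiseRecurrence bitwiseRecurrence_alt
  by_cases h0 : n = 0
  · simp [h0, recA]
  · by_cases h1 : n = 1
    · simp [h1, recA]
    · have h2 : 2 ≤ n := by omega
      simp only [beq_iff_eq, h0, h1, if_false]
      rw [PySem.List.pyRange_one, foldl_const_iterate]
      simp only [List.length_map, List.length_range]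
      rw [iterate_stepB]
      have : (n - 2 - 0).toNat + 2 = n.toNat := by omega
      rw [this]
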